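-- pv_equiv track=rewrite | github.com/benquick123/code-profiling | code/batch-1/vse-naloge-brez-testov/DN6-M-174.py | omembe
-- ===== SOURCE A (Python) =====
-- def avtor(tvit):
--     s = tvit.split(':')
--     return s[0]
--
-- def vsi_avtorji(tvits):
--     f = []
--     for s in tvits:
--         if f.count(avtor(s)) == 0:
--             f.append(avtor(s))
--     return f
--
-- def izloci_besedo(beseda):
--     while beseda[0].isalnum() == False:
--         beseda = beseda[1:]
--     while beseda[-1].isalnum() == False:
--         beseda = beseda[:-1]
--     return beseda
--
-- def se_zacne_z(tvit, c):
--     f = []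
--     tvit = tvit.split()
--     for s in tvit:
--         if s[0] == c:
--             f.append(izloci_besedo(s))
--     return f
--
-- def omembe(tviti):
--     a = vsi_avtorji(tviti)
--     d = dict.fromkeys(a, None)
--     for i in tviti:
--         s = i.split(':')
--         if d[s[0]] == None:
--             d[s[0]] = se_zacne_z(i, '@')
--         else:
--             d[s[0]] += se_zacne_z(i, '@')
--     return d
-- ===== SOURCE B (Python) =====
-- # B: index-based word stripping and a grouped dict comprehension over first-appearance
-- # authors; no fromkeys(None) seeding, no None-vs-list branch, no count-based author scan.
-- def avtor(tvit):
--     s = tvit.split(':')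
--     return s[0]
--
-- def ocisti(beseda):
--     i = 0
--     while not beseda[i].isalnum():
--         i += 1
--     j = len(beseda)
--     while not beseda[j - 1].isalnum():
--         j -= 1
--     return beseda[i:j]
--
-- def omembe_v(tvit):
--     return [ocisti(w) for w in tvit.split() if w.startswith('@')]
--
-- def omembe(tviti):
--     avtorji = list(dict.fromkeys(avtor(t) for t in tviti))
--     return {a: [m for t in tviti if avtor(t) == a for m in omembe_v(t)] for a in avtorji}
-- ===== Notes on version B (the rewrite author's own statement) =====
-- stated objective: alternative
-- what changed: Replaces A's fromkeys(None)-seeded fill loop with its None-vs-list branch by a grouped dict comprehension over first-appearance authors, and replaces the character-popping while-loops of izloci_besedo by index-based stripping (find first/last alphanumeric index, take one slice); the word filter uses startswith instead of s[0].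
import Mathlib
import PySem

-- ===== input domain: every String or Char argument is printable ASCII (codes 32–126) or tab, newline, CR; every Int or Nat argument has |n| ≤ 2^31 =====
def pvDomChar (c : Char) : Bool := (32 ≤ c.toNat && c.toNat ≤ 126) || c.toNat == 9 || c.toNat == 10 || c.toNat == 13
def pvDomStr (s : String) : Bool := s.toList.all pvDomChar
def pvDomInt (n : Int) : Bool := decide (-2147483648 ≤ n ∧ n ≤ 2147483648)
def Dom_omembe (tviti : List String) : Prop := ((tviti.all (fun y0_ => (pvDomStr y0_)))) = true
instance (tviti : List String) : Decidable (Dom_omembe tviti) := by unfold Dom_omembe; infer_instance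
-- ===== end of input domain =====

-- B replaces A's fromkeys(None)-seeded fill loop (with its None branch) by a grouped dict
-- comprehension over first-appearance authors, and the char-popping strip loops by index-based
-- stripping (objective: alternative).

-- ===== PORT A =====
-- avtor: tvit.split(':')[0]  (split(':') always yields a first piece and ':' is a one-char separator, so neither default is ever used)
def pvAvtor (tvit : String) : String :=
  PySem.List.pyGetD ((PySem.Str.split? tvit ":").getD []) 0 ""

-- vsi_avtorji: append avtor(s) when f.count(avtor(s)) == 0
def pvVsiAvtorji (tvits : List String) : List String :=
  tvits.foldl (fun f s => if f.count (pvAvtor s) = 0 then f ++ [pvAvtor s] else f) []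

-- first while of izloci_besedo; [] is where Python raises IndexError on beseda[0] (excluded by Pre_omembe)
def pvStripL : List Char → List Char
  | [] => []
  | c :: cs => if PySem.Chars.isalnum c then c :: cs else pvStripL cs

-- second while of izloci_besedo; [] is where Python raises IndexError on beseda[-1] (excluded by Pre_omembe)
def pvStripR (cs : List Char) : List Char :=
  if h : cs = [] then []
  else if PySem.Chars.isalnum (cs.getLast h) then cs
  else pvStripR cs.dropLast
termination_by cs.length
decreasing_by
  have : cs.length ≠ 0 := fun hn => h (List.length_eq_zero_iff.mp hn)
  simp [List.length_dropLast]; omega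

def pvIzlociBesedo (beseda : String) : String :=
  String.ofList (pvStripR (pvStripL beseda.toList))

-- se_zacne_z(tvit, c): the Python c is the 1-char string '@'; ported as the Char it holds.
-- s[0] never raises (split() yields nonempty words), so the pyGetD default is never used.
def pvSeZacneZ (tvit : String) (c : Char) : List String :=
  (PySem.Str.split₀ tvit).foldl
    (fun f s => if PySem.List.pyGetD s.toList 0 ' ' = c then f ++ [pvIzlociBesedo s] else f) []

def omembe (tviti : List String) : List (String × List String) :=
  let a := pvVsiAvtorji tviti
  -- dict.fromkeys(a, None): values are Option (List String), none = Python's None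
  let d0 : PySem.Dict String (Option (List String)) :=
    a.foldl (fun d k => d.insert k none) PySem.Dict.empty
  let d := tviti.foldl (fun d i =>
    let k := PySem.List.pyGetD ((PySem.Str.split? i ":").getD []) 0 ""
    match d.getD k none with   -- d[s[0]]: the key is always present (KeyError impossible)
    | none => d.insert k (some (pvSeZacneZ i '@'))
    | some v => d.insert k (some (v ++ pvSeZacneZ i '@'))) d0
  -- the returned dict: every value was set by the loop, so none never survives
  d.items.map (fun p => (p.1, p.2.getD []))

-- ===== PORT B =====
-- ocisti: i = index of the first alphanumeric char; the Python while loop runs i past the end on an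
-- all-non-alnum word and raises IndexError there (excluded by Pre_omembe); this recursion returns the length then.
def pvFirstAl : List Char → Nat
  | [] => 0
  | c :: cs => if PySem.Chars.isalnum c then 0 else pvFirstAl cs + 1

-- ocisti: j, decremented from len(beseda) while beseda[j-1] is not alphanumeric (0 when no alnum; Python raises there, excluded)
def pvLastAl (cs : List Char) : Nat :=
  if h : cs = [] then 0
  else if PySem.Chars.isalnum (cs.getLast h) then cs.length
  else pvLastAl cs.dropLast
termination_by cs.length
decreasing_by
  have : cs.length ≠ 0 := fun hn => h (List.length_eq_zero_iff.mp hn)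
  simp [List.length_dropLast]; omega

-- beseda[i:j] with 0 ≤ i and 0 ≤ j: exactly take j then drop i
def pvOcisti (beseda : String) : String :=
  String.ofList ((beseda.toList.take (pvLastAl beseda.toList)).drop (pvFirstAl beseda.toList))

-- [ocisti(w) for w in tvit.split() if w.startswith('@')]
def pvOmembeV (tvit : String) : List String :=
  ((PySem.Str.split₀ tvit).filter (fun w => PySem.Str.startswith w "@")).map pvOcisti

def omembe_alt (tviti : List String) : List (String × List String) :=
  -- list(dict.fromkeys(...)): authors deduplicated in first-appearance order
  let avtorji := PySem.Set.ofList (tviti.map pvAvtor)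
  -- {a: [m for t in tviti if avtor(t) == a for m in omembe_v(t)] for a in avtorji}
  avtorji.map (fun a => (a, (tviti.filter (fun t => pvAvtor t == a)).flatMap pvOmembeV))

-- ===== PRECONDITION & SPEC =====
-- Pre_ excludes exactly the inputs where A (and B) raises IndexError:
-- some whitespace-separated word starts with '@' but contains no alphanumeric character,
-- so the stripping loops run off the end of the word.
def Pre_omembe (tviti : List String) : Prop :=
  ∀ t ∈ tviti, ∀ w ∈ PySem.Str.split₀ t,
    w.toList.headD ' ' = '@' → w.toList.any PySem.Chars.isalnum = true
instance (tviti : List String) : Decidable (Pre_omembe tviti) := by unfold Pre_omembe; infer_instance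

def pvWitness_omembe : List String := ["ana: hej @bob!", "bob: @ana zdravo", "ana: spet @bob"]

def Spec_omembe (tviti : List String) (out : List (String × List String)) : Prop := out = omembe_alt tviti
instance (tviti : List String) (out : List (String × List String)) : Decidable (Spec_omembe tviti out) := by unfold Spec_omembe; infer_instance

-- ===== CLAIM (what is proved, stated in full; the proofs are below) =====
def Claim_equal_omembe : Prop := ∀ (tviti : List String), Dom_omembe tviti → Pre_omembe tviti → Spec_omembe tviti (omembe tviti)

-- ===== LEMMAS AND PROOFS =====

-- the common value of both sides: authors in first-appearance order, each with all its mentions (stated with A's helpers)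
def pvGroups (tviti : List String) : List (String × List String) :=
  (PySem.Set.ofList (tviti.map pvAvtor)).map
    (fun k => (k, (tviti.filter (fun i => pvAvtor i == k)).flatMap (fun i => pvSeZacneZ i '@')))

-- vsi_avtorji is the ordered dedup of the author list
theorem pvVsiAvtorji_eq (l : List String) :
    pvVsiAvtorji l = PySem.Set.ofList (l.map pvAvtor) := by
  have h : (fun (f : List String) s => if f.count (pvAvtor s) = 0 then f ++ [pvAvtor s] else f)
      = fun (f : PySem.Set String) s => f.add (pvAvtor s) := by
    funext f s
    by_cases hm : pvAvtor s ∈ f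
    · simp [List.count_eq_zero, hm]
    · simp [List.count_eq_zero, hm]
  unfold pvVsiAvtorji
  rw [h, ← PySem.Set.update_map_eq_foldl_add, PySem.Set.update_nil_left]

-- A's loop body in insert normal form
theorem pvAstep :
    (fun (d : PySem.Dict String (Option (List String))) i =>
      let k := PySem.List.pyGetD ((PySem.Str.split? i ":").getD []) 0 ""
      match d.getD k none with
      | none => d.insert k (some (pvSeZacneZ i '@'))
      | some v => d.insert k (some (v ++ pvSeZacneZ i '@')))
    = fun d i => d.insert (pvAvtor i) (some ((d.getD (pvAvtor i) none).getD [] ++ pvSeZacneZ i '@')) := by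
  funext d i
  show (match d.getD (pvAvtor i) none with
      | none => d.insert (pvAvtor i) (some (pvSeZacneZ i '@'))
      | some v => d.insert (pvAvtor i) (some (v ++ pvSeZacneZ i '@')))
    = d.insert (pvAvtor i) (some ((d.getD (pvAvtor i) none).getD [] ++ pvSeZacneZ i '@'))
  cases h : d.getD (pvAvtor i) none <;> simp

-- dict.fromkeys(a, None): every lookup with default None yields None
theorem pvFromkeys_getD (a : List String) :
    ∀ (d : PySem.Dict String (Option (List String))),
      (∀ k, d.getD k none = none) →
      ∀ k, (a.foldl (fun d k => d.insert k none) d).getD k none = none := by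
  induction a with
  | nil => intro d h k; exact h k
  | cons x xs ih =>
      intro d h k
      exact ih _ (fun k' => by rw [PySem.Dict.getD_insert]; split <;> simp_all) k

-- running A's fill loop: the value at k accumulates the mentions of k's tweets
theorem pvA_getD (l : List String) :
    ∀ (d : PySem.Dict String (Option (List String))) (k : String),
      ((l.foldl (fun d i => d.insert (pvAvtor i)
          (some ((d.getD (pvAvtor i) none).getD [] ++ pvSeZacneZ i '@'))) d).getD k none).getD []
      = (d.getD k none).getD []
        ++ (l.filter (fun i => pvAvtor i == k)).flatMap (fun i => pvSeZacneZ i '@') := by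
  induction l with
  | nil => intro d k; simp
  | cons i l ih =>
      intro d k
      rw [List.foldl_cons, ih, List.filter_cons]
      by_cases hk : pvAvtor i = k
      · subst hk; simp
      · have hb : (pvAvtor i == k) = false := by simpa using hk
        simp only [PySem.Dict.getD_insert, if_neg (Ne.symm hk), hb, Bool.false_eq_true, if_false]

-- updating a set with elements it already has changes nothing
theorem pvUpdate_self (s : PySem.Set String) (xs : List String) (h : ∀ x ∈ xs, x ∈ s) :
    s.update xs = s := by
  rw [PySem.Set.update_eq_append_filter]
  have hf : List.filter (fun y => !s.contains y) (PySem.Set.ofList xs) = [] := by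
    rw [List.filter_eq_nil_iff]
    intro y hy
    have hm : y ∈ s := h y ((PySem.Set.mem_ofList _ _).mp hy)
    simp [hm]
  rw [hf, List.append_nil]

-- A's result, closed form
theorem pvA_eq (tviti : List String) : omembe tviti = pvGroups tviti := by
  unfold omembe
  rw [pvAstep, pvVsiAvtorji_eq]
  show List.map (fun p => (p.1, p.2.getD []))
      (List.foldl
        (fun d i => d.insert (pvAvtor i) (some ((d.getD (pvAvtor i) none).getD [] ++ pvSeZacneZ i '@')))
        (List.foldl (fun d k => d.insert k none) PySem.Dict.empty
          (PySem.Set.ofList (List.map pvAvtor tviti))) tviti).items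
    = pvGroups tviti
  set a := PySem.Set.ofList (tviti.map pvAvtor) with ha
  set d0 : PySem.Dict String (Option (List String)) :=
    a.foldl (fun d k => d.insert k none) PySem.Dict.empty with hd0
  have hd0keys : d0.keys = a := by
    rw [hd0, PySem.Dict.keys_foldl_insert a (fun _ _ => none) PySem.Dict.empty,
      PySem.Dict.keys_empty, PySem.Set.update_nil_left, ha, PySem.Set.ofList_ofList]
  have hd0getD : ∀ k, d0.getD k none = none :=
    pvFromkeys_getD a PySem.Dict.empty (fun k => by simp)
  set dA := tviti.foldl (fun d i => d.insert (pvAvtor i)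
      (some ((d.getD (pvAvtor i) none).getD [] ++ pvSeZacneZ i '@'))) d0 with hdA
  have hkeys : dA.keys = a := by
    rw [hdA, PySem.Dict.keys_foldl_insert_key tviti pvAvtor
      (fun d i => some ((d.getD (pvAvtor i) none).getD [] ++ pvSeZacneZ i '@')) d0, hd0keys]
    exact pvUpdate_self a (tviti.map pvAvtor) (by intro x hx; rw [ha]; exact (PySem.Set.mem_ofList _ _).mpr hx)
  have hnodup : dA.keys.Nodup := by rw [hkeys]; exact PySem.Set.nodup_ofList _
  rw [PySem.Dict.items_eq_map_keys dA hnodup none, hkeys, List.map_map]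
  unfold pvGroups
  rw [← ha]
  apply List.map_congr_left
  intro k hk
  simp only [Function.comp]
  rw [hdA, pvA_getD tviti d0 k, hd0getD k]
  simp

-- ---- B side ----

-- w[0] with default is the head with default
theorem pvPyGetD_head (l : List Char) : PySem.List.pyGetD l 0 ' ' = l.headD ' ' := by
  cases l <;> simp [PySem.List.pyGetD, PySem.List.pyGet?, PySem.List.pyIdx?]

-- the Bool word test of B equals the Prop word test of A's fold (for any string, empty included)
theorem pvHead_startswith (s : String) :
    (PySem.List.pyGetD s.toList 0 ' ' = '@') ↔ PySem.Str.startswith s "@" = true := by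
  rw [PySem.Str.startswith_eq, PySem.Chars.startswith_iff, pvPyGetD_head]
  show (s.toList.headD ' ' = '@') ↔ ['@'] <+: s.toList
  cases s.toList with
  | nil => simp
  | cons c cs => simp [List.cons_prefix_iff]

-- se_zacne_z as filter-then-map
theorem pvSeZacneZ_eq (t : String) :
    pvSeZacneZ t '@'
      = ((PySem.Str.split₀ t).filter (fun w => PySem.Str.startswith w "@")).map pvIzlociBesedo := by
  unfold pvSeZacneZ
  rw [PySem.List.foldl_append_ite (p := fun s => PySem.List.pyGetD s.toList 0 ' ' = '@')
      (f := pvIzlociBesedo)]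
  simp only [List.nil_append]
  congr 1
  apply List.filter_congr
  intro w _
  simp [decide_eq_true_eq, pvHead_startswith w]

-- the first while loop drops exactly the first pvFirstAl characters
theorem pvStripL_eq (l : List Char) : pvStripL l = l.drop (pvFirstAl l) := by
  induction l with
  | nil => rfl
  | cons c cs ih =>
      by_cases h : PySem.Chars.isalnum c
      · simp [pvStripL, pvFirstAl, h]
      · simp [pvStripL, pvFirstAl, h, ih]

-- pvLastAl through the reverse: length after dropping the non-alnum suffix
theorem pvLastAl_eq (l : List Char) :
    pvLastAl l = (l.reverse.dropWhile (fun c => !PySem.Chars.isalnum c)).length := by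
  induction l using List.reverseRecOn with
  | nil => simp [pvLastAl]
  | append_singleton l x ih =>
      rw [pvLastAl]
      by_cases h : PySem.Chars.isalnum x
      · simp [h, List.getLast_append]
      · simp only [List.concat_eq_append, List.append_eq_nil_iff, List.cons_ne_self,
          and_false, reduceDIte, List.getLast_append, h]
        rw [if_neg (by simp [h]), List.dropLast_concat, ih]
        simp [List.dropWhile_cons, h]

theorem pvLastAl_le (l : List Char) : pvLastAl l ≤ l.length := by
  rw [pvLastAl_eq]
  calc (l.reverse.dropWhile (fun c => !PySem.Chars.isalnum c)).length
      ≤ l.reverse.length := List.length_dropWhile_le _ _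
    _ = l.length := List.length_reverse

-- the second while loop keeps exactly the first pvLastAl characters
theorem pvStripR_eq (l : List Char) : pvStripR l = l.take (pvLastAl l) := by
  induction l using List.reverseRecOn with
  | nil => simp [pvStripR, pvLastAl]
  | append_singleton l x ih =>
      rw [pvStripR, pvLastAl]
      by_cases h : PySem.Chars.isalnum x
      · simp [h, List.getLast_append]
      · simp only [List.concat_eq_append, List.append_eq_nil_iff, List.cons_ne_self,
          and_false, reduceDIte, List.getLast_append, h]
        rw [if_neg (by simp [h]), if_neg (by simp [h]), List.dropLast_concat, ih,
          List.take_append_of_le_length (pvLastAl_le l)]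

-- prepending before a list that still holds an alnum char shifts pvLastAl by one
theorem pvLastAl_cons (c : Char) (cs : List Char)
    (h : cs.any PySem.Chars.isalnum = true) : pvLastAl (c :: cs) = pvLastAl cs + 1 := by
  rw [pvLastAl_eq, pvLastAl_eq]
  have hne : cs.reverse.dropWhile (fun c => !PySem.Chars.isalnum c) ≠ [] := by
    intro hnil
    rw [List.dropWhile_eq_nil_iff] at hnil
    obtain ⟨x, hx, hal⟩ := List.any_eq_true.mp h
    have := hnil x (List.mem_reverse.mpr hx)
    simp [hal] at this
  rw [show (c :: cs).reverse = cs.reverse ++ [c] by simp, List.dropWhile_append]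
  simp only [List.isEmpty_iff, hne, if_false, List.length_append, List.length_cons,
    List.length_nil]

theorem pvLastAl_drop (l : List Char) (h : l.any PySem.Chars.isalnum = true) :
    pvLastAl (l.drop (pvFirstAl l)) = pvLastAl l - pvFirstAl l := by
  induction l with
  | nil => simp at h
  | cons c cs ih =>
      by_cases hc : PySem.Chars.isalnum c
      · simp [pvFirstAl, hc]
      · have hcs : cs.any PySem.Chars.isalnum = true := by simpa [hc] using h
        simp only [pvFirstAl, hc, Bool.false_eq_true, if_false, List.drop_succ_cons]
        rw [ih hcs, pvLastAl_cons c cs hcs]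
        omega

-- the two strippings agree on every word holding an alphanumeric character
theorem pvOcisti_eq (w : String) (h : w.toList.any PySem.Chars.isalnum = true) :
    pvIzlociBesedo w = pvOcisti w := by
  unfold pvIzlociBesedo pvOcisti
  rw [pvStripL_eq, pvStripR_eq, pvLastAl_drop w.toList h, List.drop_take]

-- per tweet: B's mention list equals A's, given Pre_'s condition on the tweet's words
theorem pvMentions_eq (t : String)
    (h : ∀ w ∈ PySem.Str.split₀ t,
      w.toList.headD ' ' = '@' → w.toList.any PySem.Chars.isalnum = true) :
    pvOmembeV t = pvSeZacneZ t '@' := by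
  rw [pvSeZacneZ_eq]
  unfold pvOmembeV
  apply List.map_congr_left
  intro w hw
  obtain ⟨hmem, hsw⟩ := List.mem_filter.mp hw
  have hhead : w.toList.headD ' ' = '@' := by
    have := (pvHead_startswith w).mpr hsw
    rwa [pvPyGetD_head] at this
  exact (pvOcisti_eq w (h w hmem hhead)).symm

-- B's result, closed form (under Pre_)
theorem pvB_eq (tviti : List String) (hp : Pre_omembe tviti) :
    omembe_alt tviti = pvGroups tviti := by
  unfold omembe_alt pvGroups
  apply List.map_congr_left
  intro k _
  refine congrArg (fun v => (k, v)) ?_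
  rw [List.flatMap, List.flatMap]
  congr 1
  apply List.map_congr_left
  intro t ht
  exact pvMentions_eq t (hp t (List.mem_of_mem_filter ht))

-- ===== VERDICT (by name: the statement is the Claim_ definition above) =====
theorem omembe_spec : Claim_equal_omembe := by
  intro tviti _ hp
  unfold Spec_omembe
  rw [pvA_eq, pvB_eq tviti hp]
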